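-- pv_equiv track=rewrite | github.com/BaeInpyo/ProgrammingExercise | Chapter11_CombinationalSearch/Allergy/ygg_allergy.py | findMaxFood
-- ===== SOURCE A (Python) =====
-- def findMaxFood(foods, chosen):
--     retIdx = []
--     maxVal = 0
--     for idx, food in enumerate(foods):
--         diffFoodLen = len(set(food)-chosen)
--         if maxVal < diffFoodLen:
--             maxVal = diffFoodLen
--             retIdx = [idx]
--         elif maxVal == diffFoodLen and maxVal != 0:
--             retIdx.append(idx)
--     return retIdx
-- ===== SOURCE B (Python) =====
-- def findMaxFood(foods, chosen):
--     scores = [len(set(food) - chosen) for food in foods]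
--     m = max(scores, default=0)
--     if m == 0:
--         return []
--     return [i for i, s in enumerate(scores) if s == m]
-- ===== Notes on version B (the rewrite author's own statement) =====
-- stated objective: simpler
-- what changed: Replaces the fused loop with mutable running-max/tie-list state by a scores table, one max, and one filtering comprehension (empty/all-zero cases fall out of the m == 0 guard).
import Mathlib
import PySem

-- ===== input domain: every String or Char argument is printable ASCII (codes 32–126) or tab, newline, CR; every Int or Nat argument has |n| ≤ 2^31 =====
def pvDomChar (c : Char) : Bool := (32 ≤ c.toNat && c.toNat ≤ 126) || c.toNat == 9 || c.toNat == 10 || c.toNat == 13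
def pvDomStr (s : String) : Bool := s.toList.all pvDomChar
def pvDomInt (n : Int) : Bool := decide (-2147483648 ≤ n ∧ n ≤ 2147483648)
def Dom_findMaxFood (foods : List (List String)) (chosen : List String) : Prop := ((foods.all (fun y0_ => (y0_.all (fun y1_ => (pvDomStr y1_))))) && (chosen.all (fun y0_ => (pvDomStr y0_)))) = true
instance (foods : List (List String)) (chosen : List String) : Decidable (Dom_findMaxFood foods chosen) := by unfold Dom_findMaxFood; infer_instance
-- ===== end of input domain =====

-- B replaces A's fused running-max/tie-list loop by a scores table, one max and one filter; same complexity, return values proved equal.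

-- shared helper: len(set(food) - chosen), used verbatim by both Python sources
def pvScore (chosen : List String) (food : List String) : Int :=
  ((PySem.Set.diff (PySem.Set.ofList food) chosen).length : Int)

-- ===== PORT A =====
def pvStepA (chosen : List String) (st : List Int × Int) (p : Int × List String) : List Int × Int :=
  if st.2 < pvScore chosen p.2 then ([p.1], pvScore chosen p.2)
  else if st.2 == pvScore chosen p.2 && st.2 != 0 then (st.1 ++ [p.1], st.2)
  else st

def findMaxFood (foods : List (List String)) (chosen : List String) : List Int :=
  ((PySem.List.enumerate foods).foldl (pvStepA chosen) ([], 0)).1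

-- ===== PORT B =====
def findMaxFood_alt (foods : List (List String)) (chosen : List String) : List Int :=
  let scores := foods.map (pvScore chosen)
  let m := (PySem.List.max? scores (fun x => x)).getD 0
  if m == 0 then []
  else ((PySem.List.enumerate scores).filter (fun p => p.2 == m)).map (·.1)

-- ===== PRECONDITION & SPEC =====
def Spec_findMaxFood (foods : List (List String)) (chosen : List String) (out : List Int) : Prop := out = findMaxFood_alt foods chosen
instance (foods : List (List String)) (chosen : List String) (out : List Int) : Decidable (Spec_findMaxFood foods chosen out) := by unfold Spec_findMaxFood; infer_instance

-- ===== CLAIM (what is proved, stated in full; the proofs are below) =====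
def Claim_equal_findMaxFood : Prop := ∀ (foods : List (List String)) (chosen : List String), Dom_findMaxFood foods chosen → Spec_findMaxFood foods chosen (findMaxFood foods chosen)

-- ===== LEMMAS AND PROOFS =====

theorem pvScore_nonneg (chosen food : List String) : 0 ≤ pvScore chosen food := by
  exact Int.natCast_nonneg _

theorem le_runMax (chosen : List String) (fs : List (List String)) (mv : Int) :
    mv ≤ fs.foldl (fun m f => max m (pvScore chosen f)) mv := by
  induction fs generalizing mv with
  | nil => simp
  | cons f t ih => exact le_trans (le_max_left _ _) (ih _)

theorem loopA_char (chosen : List String) (fs : List (List String)) :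
    ∀ (s : Int) (ret : List Int) (mv : Int), 0 ≤ mv →
    (PySem.List.enumerate fs s).foldl (pvStepA chosen) (ret, mv) =
      ((if fs.foldl (fun m f => max m (pvScore chosen f)) mv = mv then ret else []) ++
        ((PySem.List.enumerate fs s).filter
          (fun p => pvScore chosen p.2 == fs.foldl (fun m f => max m (pvScore chosen f)) mv
            && fs.foldl (fun m f => max m (pvScore chosen f)) mv != 0)).map (·.1),
       fs.foldl (fun m f => max m (pvScore chosen f)) mv) := by
  induction fs with
  | nil => intro s ret mv _; simp [PySem.List.enumerate]
  | cons f t ih =>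
    intro s ret mv hmv
    rw [PySem.List.enumerate_cons]
    simp only [List.foldl_cons]
    by_cases h1 : mv < pvScore chosen f
    · have hmaxd : max mv (pvScore chosen f) = pvScore chosen f := max_eq_right (le_of_lt h1)
      have hstep : pvStepA chosen (ret, mv) (s, f) = ([s], pvScore chosen f) := by
        simp [pvStepA, h1]
      rw [hstep, ih (s+1) [s] (pvScore chosen f) (le_trans hmv (le_of_lt h1))]
      simp only [hmaxd]
      have hdM : pvScore chosen f ≤ t.foldl (fun m f => max m (pvScore chosen f)) (pvScore chosen f) :=
        le_runMax chosen t _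
      set M := t.foldl (fun m f => max m (pvScore chosen f)) (pvScore chosen f) with hMdef
      have hMpos : M ≠ 0 := by omega
      have hMne : M ≠ mv := by omega
      rw [List.filter_cons]
      simp only [hMne, if_false]
      by_cases h2 : pvScore chosen f = M
      · simp [h2, hMpos]
      · have hne : M ≠ pvScore chosen f := fun h => h2 h.symm
        have hcond : (pvScore chosen (s, f).2 == M && (M != 0)) = false := by
          simp [h2]
        simp [hcond, hne]
    · -- score ≤ mv
      have hmaxd : max mv (pvScore chosen f) = mv := max_eq_left (not_lt.mp h1)
      simp only [hmaxd]
      by_cases h2 : mv = pvScore chosen f ∧ mv ≠ 0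
      · have hc2 : (mv == pvScore chosen f && mv != 0) = true := by
          rw [← h2.1]; simp [h2.2]
        have hstep : pvStepA chosen (ret, mv) (s, f) = (ret ++ [s], mv) := by
          simp [pvStepA, h1, hc2]
        rw [hstep, ih (s+1) (ret ++ [s]) mv hmv, List.filter_cons]
        have hmvM : mv ≤ t.foldl (fun m f => max m (pvScore chosen f)) mv := le_runMax chosen t mv
        generalize hMg : t.foldl (fun m f => max m (pvScore chosen f)) mv = M at hmvM ⊢
        have hpf : pvScore chosen f = mv := h2.1.symm
        by_cases h3 : M = mv
        · simp [h3, hpf, h2.2, List.append_assoc]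
        · have hne : ¬ pvScore chosen f = M := by omega
          simp [h3, hne]
      · have hc2 : (mv == pvScore chosen f && mv != 0) = false := by
          rcases not_and_or.mp h2 with hc | hc
          · simp [hc]
          · simp [Decidable.not_not.mp hc]
        have hstep : pvStepA chosen (ret, mv) (s, f) = (ret, mv) := by
          simp [pvStepA, h1, hc2]
        rw [hstep, ih (s+1) ret mv hmv, List.filter_cons]
        have hmvM : mv ≤ t.foldl (fun m f => max m (pvScore chosen f)) mv := le_runMax chosen t mv
        generalize hMg : t.foldl (fun m f => max m (pvScore chosen f)) mv = M at hmvM ⊢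
        have hdle : pvScore chosen f ≤ mv := not_lt.mp h1
        rcases not_and_or.mp h2 with hc | hc
        · have hne : ¬ pvScore chosen f = M := by omega
          simp [hne]
        · have hz : mv = 0 := Decidable.not_not.mp hc
          have hsnn : 0 ≤ pvScore chosen f := pvScore_nonneg chosen f
          by_cases h3 : M = 0
          · simp [h3]
          · have hne : ¬ pvScore chosen f = M := by omega
            simp [hne]

theorem enumerate_map {α β : Type} (g : α → β) (xs : List α) :
    ∀ s : Int, PySem.List.enumerate (xs.map g) s
      = (PySem.List.enumerate xs s).map (fun p => (p.1, g p.2)) := by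
  induction xs with
  | nil => intro s; simp [PySem.List.enumerate]
  | cons x t ih => intro s; simp [PySem.List.enumerate_cons, ih]

theorem maxD_eq_run (chosen : List String) (foods : List (List String)) :
    ((PySem.List.max? (foods.map (pvScore chosen)) (fun x => x)).getD 0)
      = foods.foldl (fun m f => max m (pvScore chosen f)) 0 := by
  cases foods with
  | nil => simp [PySem.List.max?]
  | cons f t =>
    simp only [List.map_cons, PySem.List.max?_id_cons, Option.getD_some, List.foldl_cons]
    have h0 : max 0 (pvScore chosen f) = pvScore chosen f :=
      max_eq_right (pvScore_nonneg chosen f)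
    rw [h0, List.foldl_map]

-- ===== VERDICT (by name: the statement is the Claim_ definition above) =====
theorem findMaxFood_spec : Claim_equal_findMaxFood := by
  intro foods chosen _
  unfold Spec_findMaxFood findMaxFood findMaxFood_alt
  rw [loopA_char chosen foods 0 [] 0 le_rfl]
  simp only [maxD_eq_run chosen foods]
  set M := foods.foldl (fun m f => max m (pvScore chosen f)) 0 with hM
  by_cases h : M = 0
  · simp [h]
  · have : ¬ (M = 0) := h
    simp only [beq_iff_eq, h, if_false]
    rw [enumerate_map]
    rw [List.filter_map, List.map_map]
    have hfe : ((fun (p : Int × Int) => p.2 == M) ∘ fun p => (p.1, pvScore chosen p.2))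
        = (fun (p : Int × List String) => pvScore chosen p.2 == M && (M != 0)) := by
      funext p; simp [h]
    rw [hfe]
    simp
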